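-- pv_equiv track=rewrite | github.com/Jang4360/poc_test | etl/scripts/06_bims_bus_load.py | build_bims_route_catalog
-- ===== SOURCE A (Python) =====
-- from typing import Any
--
-- class BimsLoadError(RuntimeError):
--     pass
--
-- def normalize_exact_text(value: object) -> str:
--     if value is None:
--         return ""
--     return str(value).strip()
--
-- def extract_catalog_route_identity(item: dict[str, Any]) -> tuple[str, str]:
--     route_id = (
--         item.get("routeId")
--         or item.get("routeid")
--         or item.get("lineid")
--         or item.get("busRouteId")
--         or item.get("busrouteid")
--     )
--     route_no = (
--         item.get("routeNo")
--         or item.get("routeno")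
--         or item.get("lineNo")
--         or item.get("lineno")
--         or item.get("busNo")
--         or item.get("buslinenum")
--     )
--     route_id_text = normalize_exact_text(route_id)
--     route_no_text = normalize_exact_text(route_no)
--     if not route_id_text or not route_no_text:
--         raise BimsLoadError(f"Could not extract BIMS route identity from item keys: {sorted(item.keys())}")
--     return route_id_text, route_no_text
--
-- def build_bims_route_catalog(items: list[dict[str, Any]]) -> tuple[dict[str, str], int]:
--     catalog: dict[str, str] = {}
--     duplicate_route_nos = 0
--     conflicts: dict[str, set[str]] = {}
--     for item in items:
--         route_id, route_no = extract_catalog_route_identity(item)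
--         existing = catalog.get(route_no)
--         if existing is None:
--             catalog[route_no] = route_id
--             continue
--         if existing == route_id:
--             duplicate_route_nos += 1
--             continue
--         conflicts.setdefault(route_no, {existing}).add(route_id)
--     if conflicts:
--         samples = {route_no: sorted(route_ids) for route_no, route_ids in sorted(conflicts.items())[:10]}
--         raise BimsLoadError(f"Conflicting BIMS routeId values for identical routeNo: {samples}")
--     return catalog, duplicate_route_nos
-- ===== SOURCE B (Python) =====
-- from typing import Any
--
-- class BimsLoadError(RuntimeError):
--     pass
--
-- def normalize_exact_text(value: object) -> str:
--     if value is None: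
--         return ""
--     return str(value).strip()
--
-- def extract_catalog_route_identity(item: dict[str, Any]) -> tuple[str, str]:
--     route_id = (
--         item.get("routeId")
--         or item.get("routeid")
--         or item.get("lineid")
--         or item.get("busRouteId")
--         or item.get("busrouteid")
--     )
--     route_no = (
--         item.get("routeNo")
--         or item.get("routeno")
--         or item.get("lineNo")
--         or item.get("lineno")
--         or item.get("busNo")
--         or item.get("buslinenum")
--     )
--     route_id_text = normalize_exact_text(route_id)
--     route_no_text = normalize_exact_text(route_no)
--     if not route_id_text or not route_no_text:
--         raise BimsLoadError(f"Could not extract BIMS route identity from item keys: {sorted(item.keys())}")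
--     return route_id_text, route_no_text
--
-- def build_bims_route_catalog(items: list[dict[str, Any]]) -> tuple[dict[str, str], int]:
--     # Pass 1: group route ids per route_no, in item order (errors fire in order).
--     groups: dict[str, list[str]] = {}
--     for item in items:
--         route_id, route_no = extract_catalog_route_identity(item)
--         groups.setdefault(route_no, []).append(route_id)
--     # Pass 2: first id of each group is the catalog value; later ids equal to it
--     # are duplicates; any id different from it is a conflict.
--     catalog: dict[str, str] = {}
--     duplicate_route_nos = 0
--     conflict_nos: list[str] = []
--     for route_no, ids in groups.items():
--         first = ids[0]
--         catalog[route_no] = first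
--         duplicate_route_nos += sum(1 for rid in ids[1:] if rid == first)
--         if any(rid != first for rid in ids):
--             conflict_nos.append(route_no)
--     if conflict_nos:
--         samples = {no: sorted(set(groups[no])) for no in sorted(conflict_nos)[:10]}
--         raise BimsLoadError(f"Conflicting BIMS routeId values for identical routeNo: {samples}")
--     return catalog, duplicate_route_nos
-- ===== Notes on version B (the rewrite author's own statement) =====
-- stated objective: alternative
-- what changed: A decides catalog/duplicate/conflict per item in a single stateful loop over three structures; B first groups route ids per routeNo in one pass, then derives catalog (first id), duplicate count (later ids equal to the first) and conflicts (any id differing from the first) from the grouping in a second pass.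
import Mathlib
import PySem

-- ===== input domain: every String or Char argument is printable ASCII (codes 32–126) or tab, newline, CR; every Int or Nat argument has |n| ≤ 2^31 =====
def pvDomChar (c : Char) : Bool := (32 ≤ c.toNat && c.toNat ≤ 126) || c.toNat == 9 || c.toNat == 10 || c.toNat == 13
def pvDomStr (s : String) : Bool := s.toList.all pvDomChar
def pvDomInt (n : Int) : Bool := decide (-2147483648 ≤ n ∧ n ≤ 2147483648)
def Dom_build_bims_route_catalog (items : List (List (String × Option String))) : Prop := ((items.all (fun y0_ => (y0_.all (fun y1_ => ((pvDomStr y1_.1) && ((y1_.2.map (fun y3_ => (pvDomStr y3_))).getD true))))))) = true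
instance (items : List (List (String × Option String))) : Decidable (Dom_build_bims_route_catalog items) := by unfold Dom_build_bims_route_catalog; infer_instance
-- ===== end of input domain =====

-- B groups route ids per routeNo in one pass and derives catalog/duplicates/conflicts
-- from the grouping in a second pass, instead of A's single stateful loop (objective: alternative).
-- Pre_ excludes exactly the inputs on which the Python A raises BimsLoadError
-- (an item without a usable routeId/routeNo, or two items mapping one routeNo to different routeIds).


-- ===== shared helper: extract_catalog_route_identity (used verbatim by both Pythons) =====
def pvKeysId : List String := ["routeId", "routeid", "lineid", "busRouteId", "busrouteid"]
def pvKeysNo : List String := ["routeNo", "routeno", "lineNo", "lineno", "busNo", "buslinenum"]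

-- Python's `item.get(k1) or item.get(k2) or …`: first truthy value; all-falsy yields a
-- value (None or "") that normalize_exact_text sends to "", so "" stands for it.
def pvFirstTruthy (item : List (String × Option String)) (keys : List String) : String :=
  (keys.findSome? (fun k =>
    ((PySem.Dict.mk item).get? k).join.bind (fun s => if s = "" then none else some s))).getD ""

-- extract_catalog_route_identity: some (route_id_text, route_no_text); none = BimsLoadError.
def pvExtract? (item : List (String × Option String)) : Option (String × String) :=
  let rid := PySem.Str.strip (pvFirstTruthy item pvKeysId)
  let rno := PySem.Str.strip (pvFirstTruthy item pvKeysNo)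
  if rid = "" ∨ rno = "" then none else some (rid, rno)

-- ===== PORT A =====
-- A's single loop: catalog, duplicate counter and conflicts dict updated per item.
-- Where the Python raises BimsLoadError (bad item / conflicts at the end) the port
-- returns the dummy ([], -1); those inputs are excluded by Pre_.
def loopA : List (List (String × Option String)) → PySem.Dict String String → Int →
    PySem.Dict String (PySem.Set String) → (List (String × String)) × Int
  | [], catalog, dup, conflicts =>
    if conflicts.items.isEmpty then (catalog.items, dup) else ([], -1)
  | item :: rest, catalog, dup, conflicts =>
    match pvExtract? item with
    | none => ([], -1)
    | some (rid, rno) =>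
      match catalog.get? rno with
      | none => loopA rest (catalog.insert rno rid) dup conflicts
      | some existing =>
        if existing = rid then loopA rest catalog (dup + 1) conflicts
        else loopA rest catalog dup
          ((conflicts.setdefault rno (PySem.Set.ofList [existing])).modify rno PySem.Set.empty
            (fun s => PySem.Set.add s rid))

def build_bims_route_catalog (items : List (List (String × Option String))) : (List (String × String)) × Int :=
  loopA items PySem.Dict.empty 0 PySem.Dict.empty

-- ===== PORT B =====
-- Pass 1: group route ids per route_no, in item order (none = BimsLoadError on a bad item).
def groupB : List (List (String × Option String)) → PySem.Dict String (List String) →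
    Option (PySem.Dict String (List String))
  | [], g => some g
  | item :: rest, g =>
    match pvExtract? item with
    | none => none
    | some (rid, rno) => groupB rest (g.insert rno (g.getD rno [] ++ [rid]))

-- Pass 2 over the grouping: catalog entry = first id, duplicates = later ids equal to
-- the first, conflict flag = any id differing from the first.
def scanB : List (String × List String) → (List (String × String)) × Int × Bool
  | [] => ([], 0, false)
  | (rno, ids) :: rest =>
    let first := ids.headD ""
    let r := scanB rest
    ((rno, first) :: r.1, ((ids.drop 1).count first : Int) + r.2.1,
      (ids.any (fun rid => rid != first)) || r.2.2)

def build_bims_route_catalog_alt (items : List (List (String × Option String))) : (List (String × String)) × Int :=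
  match groupB items PySem.Dict.empty with
  | none => ([], -1)
  | some g =>
    let r := scanB g.items
    if r.2.2 then ([], -1) else (r.1, r.2.1)

-- ===== PRECONDITION & SPEC =====
-- Exactly the inputs on which the Python A returns: every item yields a route identity,
-- and two items with the same routeNo always carry the same routeId (no conflicts).
def Pre_build_bims_route_catalog (items : List (List (String × Option String))) : Prop :=
  ∀ item ∈ items, (pvExtract? item).isSome = true ∧
    ∀ item2 ∈ items,
      (pvExtract? item).map Prod.snd = (pvExtract? item2).map Prod.snd →
      pvExtract? item = pvExtract? item2
instance (items : List (List (String × Option String))) : Decidable (Pre_build_bims_route_catalog items) := by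
  unfold Pre_build_bims_route_catalog; infer_instance

def pvWitness_build_bims_route_catalog : (List (List (String × Option String))) :=
  [[("routeId", some "11"), ("routeNo", some "100")],
   [("routeid", some "11"), ("busNo", some " 100 ")],
   [("lineid", some "22"), ("routeNo", some "200")]]

def Spec_build_bims_route_catalog (items : List (List (String × Option String))) (out : (List (String × String)) × Int) : Prop := out = build_bims_route_catalog_alt items
instance (items : List (List (String × Option String))) (out : (List (String × String)) × Int) : Decidable (Spec_build_bims_route_catalog items out) := by unfold Spec_build_bims_route_catalog; infer_instance

-- ===== CLAIM (what is proved, stated in full; the proofs are below) =====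
def Claim_equal_build_bims_route_catalog : Prop := ∀ (items : List (List (String × Option String))), Dom_build_bims_route_catalog items → Pre_build_bims_route_catalog items → Spec_build_bims_route_catalog items (build_bims_route_catalog items)

-- ===== LEMMAS AND PROOFS =====

-- the three components scanB computes, as closed maps over the grouping's items
def mHead (l : List (String × List String)) : List (String × String) :=
  l.map (fun p => (p.1, p.2.headD ""))
def dSum (l : List (String × List String)) : Int :=
  (l.map (fun p => ((p.2.drop 1).count (p.2.headD "") : Int))).sum
def cAny (l : List (String × List String)) : Bool :=
  l.any (fun p => p.2.any (fun rid => rid != p.2.headD ""))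

lemma scanB_eq (l : List (String × List String)) : scanB l = (mHead l, dSum l, cAny l) := by
  induction l with
  | nil => rfl
  | cons p rest ih => cases p; simp [scanB, ih, mHead, dSum, cAny]

lemma cAny_false {l : List (String × List String)}
    (h : ∀ p ∈ l, ∀ x ∈ p.2, x = p.2.headD "") : cAny l = false := by
  simp only [cAny, List.any_eq_false]
  intro p hp hx
  obtain ⟨x, hxm, hxb⟩ := List.any_eq_true.mp hx
  exact absurd (h p hp x hxm) (by simpa using hxb)

lemma get?_mapped (c : PySem.Dict String String) (g : PySem.Dict String (List String))
    (h : c.items = mHead g.items) (hnd : g.keys.Nodup) (k : String) :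
    c.get? k = (g.get? k).map (fun ids => ids.headD "") := by
  have hkeys : c.keys = g.keys := by
    simp only [PySem.Dict.keys, h, mHead, List.map_map]; rfl
  cases hg : g.get? k with
  | none =>
    have hk : k ∉ g.keys := (PySem.Dict.get?_eq_none_iff_not_mem_keys _ _).mp hg
    have : c.get? k = none := (PySem.Dict.get?_eq_none_iff_not_mem_keys _ _).mpr (hkeys ▸ hk)
    simp [this]
  | some ids =>
    have hmem : (k, ids) ∈ g.items := PySem.Dict.mem_items_of_get?_eq_some _ hg
    have hmem' : (k, ids.headD "") ∈ c.items := by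
      rw [h]; exact List.mem_map.mpr ⟨(k, ids), hmem, rfl⟩
    have := PySem.Dict.get?_of_mem_items _ hmem' (hkeys ▸ hnd)
    simp [this]

lemma headD_append {α : Type} (l : List α) (x d : α) (h : l ≠ []) :
    (l ++ [x]).headD d = l.headD d := by cases l with | nil => exact absurd rfl h | cons a t => rfl


lemma dSum_overwrite (l : List (String × List String)) (k : String) (ids w : List String)
    (hnd : (l.map Prod.fst).Nodup)
    (hval : ∀ p ∈ l, p.1 = k → p.2 = ids)
    (hmem : (k, ids) ∈ l) :
    dSum (l.map (fun p => if p.1 == k then (k, w) else p))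
      = dSum l + (((w.drop 1).count (w.headD "") : Int)
          - ((ids.drop 1).count (ids.headD "") : Int)) := by
  have hdcons : ∀ (x : String × List String) (t : List (String × List String)),
      dSum (x :: t) = ((x.2.drop 1).count (x.2.headD "") : Int) + dSum t := by
    intro x t; simp [dSum]
  induction l with
  | nil => cases hmem
  | cons p rest ih =>
    have hnd' := hnd
    simp only [List.map_cons, List.nodup_cons] at hnd'
    obtain ⟨hpnin, hndrest⟩ := hnd'
    by_cases hk : p.1 = k
    · have hp2 : p.2 = ids := hval p (by simp) hk
      have hrest : rest.map (fun q => if q.1 == k then (k, w) else q) = rest := by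
        have h : ∀ q ∈ rest, (if q.1 == k then (k, w) else q) = q := by
          intro q hq
          have : q.1 ≠ k := fun h => hpnin (by rw [hk, ← h]; exact List.mem_map_of_mem hq)
          simp [this]
        rw [List.map_congr_left h]; simp
      have hmapc : (p :: rest).map (fun q => if q.1 == k then (k, w) else q)
          = (k, w) :: rest := by
        rw [List.map_cons, hrest]; simp [hk]
      rw [hmapc, hdcons, hdcons, hp2]
      ring
    · have hfp : (if p.1 == k then (k, w) else p) = p := by simp [hk]
      have hmem' : (k, ids) ∈ rest := by
        rcases List.mem_cons.mp hmem with h | h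
        · exact absurd (congrArg Prod.fst h).symm hk
        · exact h
      rw [List.map_cons, hfp, hdcons, hdcons,
        ih hndrest (fun q hq => hval q (List.mem_cons_of_mem _ hq)) hmem']
      ring

-- main invariant lemma: A's loop against B's grouping, generalized over the state
lemma mainA (items : List (List (String × Option String))) :
    ∀ (g : PySem.Dict String (List String)) (catalog : PySem.Dict String String) (dup : Int),
    g.keys.Nodup →
    catalog.items = mHead g.items →
    (∀ p ∈ g.items, p.2 ≠ []) →
    (∀ p ∈ g.items, ∀ x ∈ p.2, x = p.2.headD "") →
    (∀ item ∈ items, ∃ rid rno, pvExtract? item = some (rid, rno) ∧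
        (∀ ids, g.get? rno = some ids → rid = ids.headD "") ∧
        (∀ item2 ∈ items, ∀ rid2, pvExtract? item2 = some (rid2, rno) → rid2 = rid)) →
    ∃ g', groupB items g = some g' ∧
      loopA items catalog dup PySem.Dict.empty = (mHead g'.items, dup + (dSum g'.items - dSum g.items)) ∧
      g'.keys.Nodup ∧
      (∀ p ∈ g'.items, p.2 ≠ []) ∧
      (∀ p ∈ g'.items, ∀ x ∈ p.2, x = p.2.headD "") := by
  induction items with
  | nil =>
    intro g catalog dup hnd hcat hne hall _
    exact ⟨g, rfl, by simp [loopA, PySem.Dict.empty, hcat], hnd, hne, hall⟩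
  | cons item rest ih =>
    intro g catalog dup hnd hcat hne hall hext
    obtain ⟨rid, rno, hex, hg, hpair⟩ := hext item (by simp)
    have hcget := get?_mapped catalog g hcat hnd rno
    cases hgget : g.get? rno with
    | none =>
      -- new routeNo: catalog inserts, grouping starts a singleton group
      have hcnone : catalog.get? rno = none := by rw [hcget, hgget]; rfl
      have hgc : g.contains rno = false := by
        rw [PySem.Dict.contains_eq_isSome_get?, hgget]; rfl
      have hcc : catalog.contains rno = false := by
        rw [PySem.Dict.contains_eq_isSome_get?, hcnone]; rfl
      have hgetD : g.getD rno [] = [] := PySem.Dict.getD_of_not_contains _ _ hgc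
      have hstep :
          ∃ g', groupB rest (g.insert rno [rid]) = some g' ∧
            loopA rest (catalog.insert rno rid) dup PySem.Dict.empty
              = (mHead g'.items, dup + (dSum g'.items - dSum (g.insert rno [rid]).items)) ∧
            g'.keys.Nodup ∧ (∀ p ∈ g'.items, p.2 ≠ []) ∧
            (∀ p ∈ g'.items, ∀ x ∈ p.2, x = p.2.headD "") := by
        apply ih
        · exact PySem.Dict.nodup_keys_insert g rno [rid] hnd
        · rw [PySem.Dict.items_insert_of_not_contains _ _ hcc,
              PySem.Dict.items_insert_of_not_contains _ _ hgc]
          simp [mHead, hcat]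
        · intro p hp
          rcases (PySem.Dict.mem_items_insert _ _ _ _).mp hp with h | ⟨h, _⟩
          · simp [h]
          · exact hne p h
        · intro p hp
          rcases (PySem.Dict.mem_items_insert _ _ _ _).mp hp with h | ⟨h, _⟩
          · subst h; intro x hx; simpa using hx
          · exact hall p h
        · intro item2 h2
          obtain ⟨rid2, rno2, hex2, hg2, hpair2⟩ := hext item2 (List.mem_cons_of_mem _ h2)
          refine ⟨rid2, rno2, hex2, ?_, fun i3 h3 => hpair2 i3 (List.mem_cons_of_mem _ h3)⟩
          intro ids hids
          by_cases hk : rno2 = rno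
          · subst hk
            rw [PySem.Dict.get?_insert_self _ _ _] at hids
            cases hids
            exact (hpair2 item (by simp) rid hex).symm ▸ rfl
          · rw [PySem.Dict.get?_insert_of_ne _ _ hk] at hids
            exact hg2 ids hids
      obtain ⟨g', hgb, hla, h1, h2, h3⟩ := hstep
      refine ⟨g', ?_, ?_, h1, h2, h3⟩
      · simp [groupB, hex, hgetD, hgb]
      · have hdS : dSum (g.insert rno [rid]).items = dSum g.items := by
          rw [PySem.Dict.items_insert_of_not_contains _ _ hgc]
          simp [dSum]
        simp only [loopA, hex, hcnone]
        rw [hla, hdS]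
    | some ids =>
      -- routeNo already present: duplicate (conflicts are excluded by the hypotheses)
      have hidsne : ids ≠ [] := hne _ (PySem.Dict.mem_items_of_get?_eq_some _ hgget)
      have hrid : rid = ids.headD "" := hg ids hgget
      have hcsome : catalog.get? rno = some (ids.headD "") := by rw [hcget, hgget]; rfl
      have hgc : g.contains rno = true := by
        rw [PySem.Dict.contains_eq_isSome_get?, hgget]; rfl
      have hgetD : g.getD rno [] = ids := PySem.Dict.getD_of_get?_eq_some _ _ hgget
      have hval : ∀ p ∈ g.items, p.1 = rno → p.2 = ids := by
        intro p hp hk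
        have hp' : (rno, p.2) ∈ g.items := by rw [← hk]; exact hp
        have := PySem.Dict.get?_of_mem_items _ hp' hnd
        rw [hgget] at this; exact (Option.some_injective _ this.symm)
      have hitems : (g.insert rno (ids ++ [rid])).items
          = g.items.map (fun p => if p.1 == rno then (rno, ids ++ [rid]) else p) :=
        PySem.Dict.items_insert_of_contains _ _ hgc
      have hstep :
          ∃ g', groupB rest (g.insert rno (ids ++ [rid])) = some g' ∧
            loopA rest catalog (dup + 1) PySem.Dict.empty
              = (mHead g'.items, (dup + 1) + (dSum g'.items - dSum (g.insert rno (ids ++ [rid])).items)) ∧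
            g'.keys.Nodup ∧ (∀ p ∈ g'.items, p.2 ≠ []) ∧
            (∀ p ∈ g'.items, ∀ x ∈ p.2, x = p.2.headD "") := by
        apply ih
        · exact PySem.Dict.nodup_keys_insert g rno (ids ++ [rid]) hnd
        · rw [hitems, hcat]
          simp only [mHead, List.map_map]
          apply List.map_congr_left
          intro p hp
          by_cases hk : p.1 = rno
          · simp only [Function.comp, hk, beq_self_eq_true, if_true]
            rw [headD_append _ _ _ hidsne, ← hval p hp hk]
          · simp [Function.comp, hk]
        · intro p hp
          rw [hitems] at hp
          obtain ⟨q, hq, hpq⟩ := List.mem_map.mp hp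
          by_cases hk : q.1 = rno
          · simp only [hk, beq_self_eq_true, if_true] at hpq
            rw [← hpq]; simp
          · have hfq : (if q.1 == rno then (rno, ids ++ [rid]) else q) = q := by simp [hk]
            rw [hfq] at hpq
            rw [← hpq]; exact hne q hq
        · intro p hp
          rw [hitems] at hp
          obtain ⟨q, hq, hpq⟩ := List.mem_map.mp hp
          by_cases hk : q.1 = rno
          · simp only [hk, beq_self_eq_true, if_true] at hpq
            rw [← hpq]
            intro x hx
            rw [headD_append _ _ _ hidsne]
            rcases List.mem_append.mp hx with h | h
            · have := hall q hq x (by rw [hval q hq hk]; exact h)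
              rw [hval q hq hk] at this; exact this
            · simp only [List.mem_singleton] at h; subst h; exact hrid
          · have hfq : (if q.1 == rno then (rno, ids ++ [rid]) else q) = q := by simp [hk]
            rw [hfq] at hpq
            rw [← hpq]; exact hall q hq
        · intro item2 h2
          obtain ⟨rid2, rno2, hex2, hg2, hpair2⟩ := hext item2 (List.mem_cons_of_mem _ h2)
          refine ⟨rid2, rno2, hex2, ?_, fun i3 h3 => hpair2 i3 (List.mem_cons_of_mem _ h3)⟩
          intro ids2 hids2
          by_cases hk : rno2 = rno
          · subst hk
            rw [PySem.Dict.get?_insert_self _ _ _] at hids2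
            cases hids2
            rw [headD_append _ _ _ hidsne]
            exact hg2 ids hgget
          · rw [PySem.Dict.get?_insert_of_ne _ _ hk] at hids2
            exact hg2 ids2 hids2
      obtain ⟨g', hgb, hla, h1, h2, h3⟩ := hstep
      refine ⟨g', ?_, ?_, h1, h2, h3⟩
      · simp [groupB, hex, hgetD, hgb]
      · have hkeys : (g.items.map Prod.fst).Nodup := by
          simpa [PySem.Dict.keys] using hnd
        have hmemg : (rno, ids) ∈ g.items := PySem.Dict.mem_items_of_get?_eq_some _ hgget
        have hdS : dSum (g.insert rno (ids ++ [rid])).items = dSum g.items + 1 := by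
          rw [hitems, dSum_overwrite g.items rno ids (ids ++ [rid]) hkeys hval hmemg]
          have hdrop : (ids ++ [rid]).drop 1 = ids.drop 1 ++ [rid] :=
            List.drop_append_of_le_length (by cases ids with
              | nil => exact absurd rfl hidsne
              | cons a t => simp)
          rw [headD_append _ _ _ hidsne, hdrop]
          simp [List.count_append, hrid]
        simp only [loopA, hex, hcsome]
        rw [if_pos hrid.symm, hla, hdS]
        congr 1
        ring

-- ===== VERDICT (by name: the statement is the Claim_ definition above) =====
theorem build_bims_route_catalog_spec : Claim_equal_build_bims_route_catalog := by
  intro items _ hpre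
  unfold Spec_build_bims_route_catalog
  have hext : ∀ item ∈ items, ∃ rid rno, pvExtract? item = some (rid, rno) ∧
      (∀ ids, (PySem.Dict.empty : PySem.Dict String (List String)).get? rno = some ids → rid = ids.headD "") ∧
      (∀ item2 ∈ items, ∀ rid2, pvExtract? item2 = some (rid2, rno) → rid2 = rid) := by
    intro item hmem
    obtain ⟨hsome, hcons⟩ := hpre item hmem
    obtain ⟨⟨rid, rno⟩, hex⟩ := Option.isSome_iff_exists.mp hsome
    refine ⟨rid, rno, hex, ?_, ?_⟩
    · intro ids hids; rw [PySem.Dict.get?_empty] at hids; cases hids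
    · intro item2 h2 rid2 hex2
      have := hcons item2 h2 (by rw [hex, hex2]; rfl)
      rw [hex, hex2] at this
      cases this; rfl
  obtain ⟨g', hgb, hla, hnd', hne', hall'⟩ :=
    mainA items PySem.Dict.empty PySem.Dict.empty 0 (by simp)
      (by rfl)
      (by intro p hp; simp [PySem.Dict.empty] at hp)
      (by intro p hp; simp [PySem.Dict.empty] at hp) hext
  unfold build_bims_route_catalog build_bims_route_catalog_alt
  rw [hla]
  simp only [hgb, scanB_eq, cAny_false hall']
  simp [dSum, PySem.Dict.empty]
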